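-- pv_equiv track=rewrite | github.com/chamoddissanayake/Video-Editor-QA-Extractor | utils/assembly_ai/speech_to_text.py | get_lecturer_transcription
-- ===== SOURCE A (Python) =====
-- def get_lecturer_transcription(words_array):
--     spoke_persons = {}
--     for word in words_array:
--         if word["speaker"] not in spoke_persons:
--             spoke_persons[word["speaker"]] = 1
--         else:
--             spoke_persons[word['speaker']] = spoke_persons[word['speaker']] + 1
--     lecturer_type = max(spoke_persons, key=spoke_persons.get)
--     lecturer_words = ''
--     if len(spoke_persons) > 0:
--         for word in words_array:
--             if word['speaker'] == lecturer_type: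
--                 lecturer_words += str(word['text']) + ' '
--
--     return lecturer_words
-- ===== SOURCE B (Python) =====
-- def get_lecturer_transcription(words_array):
--     by_speaker = {}
--     for word in words_array:
--         by_speaker.setdefault(word['speaker'], []).append(word)
--     lecturer = max(by_speaker, key=lambda s: len(by_speaker[s]))
--     return ''.join(str(w['text']) + ' ' for w in by_speaker[lecturer])
-- ===== Notes on version B (the rewrite author's own statement) =====
-- stated objective: alternative
-- what changed: Replaces count-then-rescan (a frequency dict followed by a second full pass over words_array to collect the lecturer's texts) with group-then-select: one pass groups the words themselves into an ordered dict of per-speaker lists, the lecturer is the speaker with the longest list (insertion order preserves first-appearance tie-breaking), and the result is joined from that speaker's list with a trailing space per word.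
import Mathlib
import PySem

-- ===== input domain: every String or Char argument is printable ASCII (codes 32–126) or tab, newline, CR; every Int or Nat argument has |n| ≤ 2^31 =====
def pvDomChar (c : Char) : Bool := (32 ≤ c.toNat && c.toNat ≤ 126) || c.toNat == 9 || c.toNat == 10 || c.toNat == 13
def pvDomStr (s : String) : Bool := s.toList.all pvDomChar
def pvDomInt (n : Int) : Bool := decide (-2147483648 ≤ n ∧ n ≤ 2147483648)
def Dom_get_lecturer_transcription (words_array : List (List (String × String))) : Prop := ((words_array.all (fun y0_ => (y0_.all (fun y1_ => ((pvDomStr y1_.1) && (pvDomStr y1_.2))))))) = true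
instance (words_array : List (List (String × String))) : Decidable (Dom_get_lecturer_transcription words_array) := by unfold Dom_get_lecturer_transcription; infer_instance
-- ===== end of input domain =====

-- B replaces A's count-then-rescan with a single grouping pass (dict of text lists) and a join; return value only, no mutation.

-- word[k] for a word dict; exact under Pre_ (which guarantees the key is present, so Python's KeyError cannot fire)
def wGet (w : List (String × String)) (k : String) : String :=
  (PySem.Dict.get? (PySem.Dict.mk w) k).getD ""

-- ===== PORT A =====
def get_lecturer_transcription (words_array : List (List (String × String))) : String :=
  -- spoke_persons = {}; for word in words_array: count word['speaker']
  let spoke_persons : PySem.Dict String Int :=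
    words_array.foldl (fun d w =>
      if PySem.Dict.contains d (wGet w "speaker") = false then
        PySem.Dict.insert d (wGet w "speaker") 1
      else
        -- d[k] + 1 ported as getD k 0 + 1; exact since this branch is guarded by contains
        PySem.Dict.insert d (wGet w "speaker") (PySem.Dict.getD d (wGet w "speaker") 0 + 1))
      PySem.Dict.empty
  -- max(spoke_persons, key=spoke_persons.get); .get ported as getD 0, exact on the dict's own keys
  let lecturer_type := (PySem.List.max? (PySem.Dict.keys spoke_persons)
      (fun s => PySem.Dict.getD spoke_persons s 0)).getD ""
  -- strings built as char lists (Lean's String.append is kernel-opaque); lecturer_words += str(word['text']) + ' '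
  let lecturer_words : List Char :=
    if PySem.Dict.size spoke_persons > 0 then
      words_array.foldl (fun acc w =>
        if wGet w "speaker" == lecturer_type then acc ++ (wGet w "text").toList ++ [' '] else acc) []
    else []
  String.ofList lecturer_words

-- ===== PORT B =====
def get_lecturer_transcription_alt (words_array : List (List (String × String))) : String :=
  -- by_speaker.setdefault(word['speaker'], []).append(word) = modify with default []
  let by_speaker : PySem.Dict String (List (List (String × String))) :=
    words_array.foldl (fun d w =>
      PySem.Dict.modify d (wGet w "speaker") [] (fun ws => ws ++ [w])) PySem.Dict.empty
  -- max(by_speaker, key=lambda s: len(by_speaker[s]))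
  let lecturer := (PySem.List.max? (PySem.Dict.keys by_speaker)
      (fun s => (PySem.Dict.getD by_speaker s []).length)).getD ""
  -- ''.join(str(w['text']) + ' ' for w in by_speaker[lecturer]), at char level
  String.ofList (PySem.Chars.join []
    ((PySem.Dict.getD by_speaker lecturer []).map (fun w => (wGet w "text").toList ++ [' '])))

-- ===== PRECONDITION & SPEC =====
-- Pre_ excludes exactly the inputs on which A raises: the empty list (max of an empty dict raises
-- ValueError), words missing the 'speaker' key (KeyError), and inputs where a word of the lecturer —
-- the first speaker of maximal frequency, here characterized declaratively — misses the 'text' key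
-- (A reads 'text' only for the lecturer's words and raises KeyError there).
def Pre_get_lecturer_transcription (words_array : List (List (String × String))) : Prop :=
  words_array ≠ [] ∧
  (∀ w ∈ words_array, PySem.Dict.contains (PySem.Dict.mk w) "speaker" = true) ∧
  (∀ w ∈ words_array,
    wGet w "speaker" =
      ((words_array.map (fun u => wGet u "speaker")).filter
        (fun s => decide (∀ v ∈ words_array.map (fun u => wGet u "speaker"),
          (words_array.map (fun u => wGet u "speaker")).count v ≤
          (words_array.map (fun u => wGet u "speaker")).count s))).headI →
    PySem.Dict.contains (PySem.Dict.mk w) "text" = true)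

instance (words_array : List (List (String × String))) : Decidable (Pre_get_lecturer_transcription words_array) := by
  unfold Pre_get_lecturer_transcription; infer_instance

def pvWitness_get_lecturer_transcription : (List (List (String × String))) :=
  [[("speaker", "A"), ("text", "hello")], [("speaker", "B"), ("text", "hi")], [("speaker", "A"), ("text", "all")]]

def Spec_get_lecturer_transcription (words_array : List (List (String × String))) (out : String) : Prop := out = get_lecturer_transcription_alt words_array
instance (words_array : List (List (String × String))) (out : String) : Decidable (Spec_get_lecturer_transcription words_array out) := by unfold Spec_get_lecturer_transcription; infer_instance

-- ===== CLAIM (what is proved, stated in full; the proofs are below) =====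
def Claim_equal_get_lecturer_transcription : Prop := ∀ (words_array : List (List (String × String))), Dom_get_lecturer_transcription words_array → Pre_get_lecturer_transcription words_array → Spec_get_lecturer_transcription words_array (get_lecturer_transcription words_array)

-- ===== LEMMAS AND PROOFS =====

-- two key functions inducing the same strict order give the same (first) maximum
theorem max?_congr_order {α κ₁ κ₂ : Type} [LinearOrder κ₁] [LinearOrder κ₂]
    (xs : List α) (k₁ : α → κ₁) (k₂ : α → κ₂)
    (h : ∀ a b : α, k₁ a < k₁ b ↔ k₂ a < k₂ b) :
    PySem.List.max? xs k₁ = PySem.List.max? xs k₂ := by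
  unfold PySem.List.max?
  suffices H : ∀ (acc : Option α),
      xs.foldl (fun acc x => match acc with
        | none => some x
        | some m => if k₁ m < k₁ x then some x else some m) acc =
      xs.foldl (fun acc x => match acc with
        | none => some x
        | some m => if k₂ m < k₂ x then some x else some m) acc from H none
  induction xs with
  | nil => intro acc; rfl
  | cons x t ih =>
    intro acc
    cases acc with
    | none => simpa using ih (some x)
    | some m =>
      by_cases hlt : k₁ m < k₁ x
      · simp [hlt, (h m x).mp hlt, ih]
      · simp [hlt, (h m x).not.mp hlt, ih]

-- fold appending a list per selected element = flatMap over the filtered list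
theorem foldl_append_if_flat {α β : Type} (p : α → Bool) (f : α → List β) (l : List α) (acc : List β) :
    l.foldl (fun acc x => if p x then acc ++ f x else acc) acc = acc ++ (l.filter p).flatMap f := by
  induction l generalizing acc with
  | nil => simp
  | cons x t ih =>
    by_cases hx : p x
    · simp [hx, ih, List.append_assoc]
    · simp [hx, ih]

theorem join_nil_sep (l : List (List Char)) : PySem.Chars.join [] l = l.flatten := by
  unfold PySem.Chars.join
  induction l with
  | nil => rfl
  | cons x t ih =>
    cases t with
    | nil => simp [List.intercalate]
    | cons y u => simp_all [List.intercalate, List.intersperse]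

-- ===== VERDICT (by name: the statement is the Claim_ definition above) =====
theorem get_lecturer_transcription_spec : Claim_equal_get_lecturer_transcription := by
  intro words _hdom hpre
  obtain ⟨hne, -⟩ := hpre
  unfold Spec_get_lecturer_transcription
  unfold get_lecturer_transcription get_lecturer_transcription_alt
  simp only
  -- A's counting fold in canonical form
  rw [show words.foldl (fun d w =>
        if PySem.Dict.contains d (wGet w "speaker") = false then
          PySem.Dict.insert d (wGet w "speaker") (1 : Int)
        else
          PySem.Dict.insert d (wGet w "speaker") (PySem.Dict.getD d (wGet w "speaker") 0 + 1))
        PySem.Dict.empty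
      = (words.map (fun w => wGet w "speaker")).foldl
          (fun d x => PySem.Dict.insert d x (PySem.Dict.getD d x 0 + 1)) PySem.Dict.empty by
    rw [List.foldl_map]
    congr 1
    funext d w
    by_cases hc : PySem.Dict.contains d (wGet w "speaker") = false
    · rw [if_pos hc, PySem.Dict.getD_of_not_contains d _ hc]; norm_num
    · rw [if_neg hc]]
  -- B's grouping fold in canonical (pair-list) form
  rw [show words.foldl (fun d w =>
        PySem.Dict.modify d (wGet w "speaker") [] (fun ws => ws ++ [w])) PySem.Dict.empty
      = (words.map (fun w => (wGet w "speaker", w))).foldl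
          (fun d p => PySem.Dict.modify d p.1 [] (fun x => x ++ [p.2])) PySem.Dict.empty by
    rw [List.foldl_map]]
  set speakers := words.map (fun w => wGet w "speaker") with hsp
  set counts : PySem.Dict String Int := speakers.foldl
      (fun d x => PySem.Dict.insert d x (PySem.Dict.getD d x 0 + 1)) PySem.Dict.empty with hcounts
  set groups := (words.map (fun w => (wGet w "speaker", w))).foldl
      (fun d p => PySem.Dict.modify d p.1 [] (fun x => x ++ [p.2])) PySem.Dict.empty with hgroups
  have hgetA : ∀ s, PySem.Dict.getD counts s 0 = (speakers.count s : Int) := by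
    intro s; rw [hcounts, PySem.Dict.getD_foldl_insert_add_one]; simp
  have hgetB : ∀ s, PySem.Dict.getD groups s [] = words.filter (fun w => wGet w "speaker" == s) := by
    intro s; rw [hgroups, PySem.Dict.getD_foldl_modify_append]
    simp [List.filter_map, Function.comp_def]
  have hkeysA : PySem.Dict.keys counts = PySem.Set.ofList speakers := by
    rw [hcounts, PySem.Dict.keys_foldl_insert]; rfl
  have hkeysB : PySem.Dict.keys groups = PySem.Set.ofList speakers := by
    rw [hgroups, PySem.Dict.keys_foldl_modify_key]
    simp only [List.map_map]
    rw [hsp]; rfl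
  have hlenB : ∀ s, (PySem.Dict.getD groups s []).length = speakers.count s := by
    intro s
    rw [hgetB s, ← List.countP_eq_length_filter, hsp, List.count_eq_countP, List.countP_map]
    rfl
  -- the two maxima agree
  have hmax : PySem.List.max? (PySem.Dict.keys counts) (fun s => PySem.Dict.getD counts s 0)
      = PySem.List.max? (PySem.Dict.keys groups) (fun s => (PySem.Dict.getD groups s []).length) := by
    rw [hkeysA, hkeysB]
    rw [show (fun s => PySem.Dict.getD counts s 0) = (fun s => (speakers.count s : Int)) from funext hgetA]
    rw [show (fun s => (PySem.Dict.getD groups s []).length) = (fun s => speakers.count s) from funext hlenB]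
    exact max?_congr_order _ _ _ (fun a b => by exact_mod_cast Iff.rfl)
  rw [hmax]
  set L := (PySem.List.max? (PySem.Dict.keys groups) fun s => (PySem.Dict.getD groups s []).length).getD ""
  -- the dict is non-empty, so A's guard is true
  have hsize : PySem.Dict.size counts > 0 := by
    have hlen : (PySem.Dict.keys counts).length = PySem.Dict.size counts := by
      simp [PySem.Dict.keys, PySem.Dict.size]
    cases words with
    | nil => exact absurd rfl hne
    | cons w t =>
      have hmem : wGet w "speaker" ∈ PySem.Dict.keys counts := by
        rw [hkeysA, hsp]
        exact (PySem.Set.mem_ofList _ _).mpr (by simp)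
      have := List.length_pos_of_mem hmem
      omega
  rw [if_pos hsize]
  -- both sides are the flattened texts of the lecturer's words
  congr 1
  rw [show (fun (acc : List Char) w =>
        if wGet w "speaker" == L then acc ++ (wGet w "text").toList ++ [' '] else acc)
      = (fun acc w => if wGet w "speaker" == L then acc ++ ((wGet w "text").toList ++ [' ']) else acc) by
    funext acc w; split_ifs <;> simp]
  rw [foldl_append_if_flat, hgetB L, join_nil_sep, List.nil_append, List.flatMap_def]
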